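-- pv_equiv track=rewrite | github.com/nalalalan/alan-operator-site | backend/app/services/buyer_acquisition_collect_v1.py | _prefer_email
-- ===== SOURCE A (Python) =====
-- def _prefer_email(emails: list[str], domain: str) -> tuple[str, str]:
--     if not emails:
--         if domain:
--             return f"hello@{domain}", "synthetic"
--         return "", ""
--     prefixes = ["founder@", "owner@", "hello@", "contact@", "info@", "sales@"]
--     for prefix in prefixes:
--         for email in emails:
--             if email.startswith(prefix):
--                 return email, "public"
--     for email in emails:
--         if domain and email.endswith(f"@{domain}"):
--             return email, "public"
--     return emails[0], "public"
-- ===== SOURCE B (Python) =====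
-- PREFIXES = ["founder@", "owner@", "hello@", "contact@", "info@", "sales@"]
--
--
-- def _match_priority(email):
--     for i, p in enumerate(PREFIXES):
--         if email.startswith(p):
--             return i
--     return None
--
--
-- def _prefer_email(emails: list[str], domain: str) -> tuple[str, str]:
--     if not emails:
--         return ("hello@" + domain, "synthetic") if domain else ("", "")
--     best = None  # (priority, email); strict < so the earliest email wins ties
--     for email in emails:
--         i = _match_priority(email)
--         if i is not None and (best is None or i < best[0]):
--             best = (i, email)
--     if best is not None:
--         return best[1], "public"
--     if domain:
--         suffix = "@" + domain
--         for email in emails: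
--             if email.endswith(suffix):
--                 return email, "public"
--     return emails[0], "public"
-- ===== Notes on version B (the rewrite author's own statement) =====
-- stated objective: faster
-- what changed: Replaces the prefix-outer/email-inner nested scan with a single pass over emails that keeps the best (lowest prefix-priority) email seen so far, updating only on a strictly lower priority index so the first email wins ties.
import Mathlib
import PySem

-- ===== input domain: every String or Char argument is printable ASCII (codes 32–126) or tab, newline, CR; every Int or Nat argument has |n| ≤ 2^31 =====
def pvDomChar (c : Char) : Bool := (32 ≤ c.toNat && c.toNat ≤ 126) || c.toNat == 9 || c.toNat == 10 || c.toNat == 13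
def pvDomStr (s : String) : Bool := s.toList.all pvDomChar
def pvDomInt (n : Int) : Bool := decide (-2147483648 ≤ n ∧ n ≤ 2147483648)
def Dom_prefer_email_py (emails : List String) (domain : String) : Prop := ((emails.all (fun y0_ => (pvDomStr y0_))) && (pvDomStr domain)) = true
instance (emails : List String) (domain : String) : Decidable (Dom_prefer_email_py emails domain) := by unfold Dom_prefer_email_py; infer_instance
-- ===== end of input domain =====

-- B replaces A's prefix-outer/email-inner nested scan by one pass over the emails that
-- keeps the best (lowest prefix-priority) email seen so far (strict < so the first email wins ties).

-- ===== PORT A =====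
def pvPrefixes : List String := ["founder@", "owner@", "hello@", "contact@", "info@", "sales@"]

def prefer_email_py (emails : List String) (domain : String) : String × String :=
  if emails.isEmpty then
    if domain ≠ "" then ("hello@" ++ domain, "synthetic") else ("", "")
  else
    match pvPrefixes.findSome? (fun p => emails.find? (fun e => PySem.Str.startswith e p)) with
    | some e => (e, "public")
    | none =>
      match emails.find? (fun e => decide (domain ≠ "") && PySem.Str.endswith e ("@" ++ domain)) with
      | some e => (e, "public")
      | none => (emails.headD "", "public")

-- ===== PORT B =====
-- _match_priority: scan the prefix list once, returning the index of the first match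
def pvMatchPriorityIn (ps : List String) (email : String) : Option Nat :=
  ps.findIdx? (fun p => PySem.Str.startswith email p)

-- the loop body: update the running best only on a strictly lower priority index
def pvStep (ps : List String) (best : Option (Nat × String)) (email : String) : Option (Nat × String) :=
  match pvMatchPriorityIn ps email with
  | none => best
  | some i =>
    match best with
    | none => some (i, email)
    | some (j, f) => if i < j then some (i, email) else some (j, f)

def prefer_email_py_alt (emails : List String) (domain : String) : String × String :=
  if emails.isEmpty then
    if domain ≠ "" then ("hello@" ++ domain, "synthetic") else ("", "")
  else
    match emails.foldl (pvStep pvPrefixes) none with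
    | some (_, e) => (e, "public")
    | none =>
      match (if domain ≠ "" then emails.find? (fun e => PySem.Str.endswith e ("@" ++ domain)) else none) with
      | some e => (e, "public")
      | none => (emails.headD "", "public")

-- ===== PRECONDITION & SPEC =====
def Spec_prefer_email_py (emails : List String) (domain : String) (out : String × String) : Prop := out = prefer_email_py_alt emails domain
instance (emails : List String) (domain : String) (out : String × String) : Decidable (Spec_prefer_email_py emails domain out) := by unfold Spec_prefer_email_py; infer_instance

-- ===== CLAIM (what is proved, stated in full; the proofs are below) =====
def Claim_equal_prefer_email_py : Prop := ∀ (emails : List String) (domain : String), Dom_prefer_email_py emails domain → Spec_prefer_email_py emails domain (prefer_email_py emails domain)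

-- ===== LEMMAS AND PROOFS =====
def pvCombine : Option (Nat × String) → Option (Nat × String) → Option (Nat × String)
  | none, r => r
  | some b, none => some b
  | some (j, f), some (i, e) => if i < j then some (i, e) else some (j, f)

theorem pvStep_none (ps : List String) (a : String) :
    pvStep ps none a = (pvMatchPriorityIn ps a).map (fun i => (i, a)) := by
  unfold pvStep; cases pvMatchPriorityIn ps a <;> rfl

theorem pvCombine_step (ps : List String) (acc x : Option (Nat × String)) (e : String) :
    pvCombine (pvStep ps acc e) x = pvCombine acc (pvCombine (pvStep ps none e) x) := by
  unfold pvStep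
  cases h : pvMatchPriorityIn ps e <;>
    rcases acc with _ | ⟨j, f⟩ <;> rcases x with _ | ⟨k, g⟩ <;>
    simp [pvCombine] <;> split_ifs <;> simp [pvCombine] <;> split_ifs <;>
    first | rfl | omega

theorem pvFoldl_acc (ps : List String) (es : List String) (acc : Option (Nat × String)) :
    es.foldl (pvStep ps) acc = pvCombine acc (es.foldl (pvStep ps) none) := by
  induction es generalizing acc with
  | nil => cases acc <;> rfl
  | cons e es ih =>
    simp only [List.foldl_cons]
    rw [ih (pvStep ps acc e), ih (pvStep ps none e), pvCombine_step]

theorem pvFoldl_nil_ps (es : List String) :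
    es.foldl (pvStep ([] : List String)) none = none := by
  induction es with
  | nil => rfl
  | cons e es ih => simpa [pvStep, pvMatchPriorityIn] using ih

theorem pvMP_cons (p : String) (ps : List String) (a : String) :
    pvMatchPriorityIn (p :: ps) a =
      if PySem.Str.startswith a p then some 0 else (pvMatchPriorityIn ps a).map (· + 1) := by
  simp [pvMatchPriorityIn, List.findIdx?_cons]

theorem pvFoldl_cons_some (p : String) (ps es : List String) (e₀ : String)
    (h : es.find? (fun e => PySem.Str.startswith e p) = some e₀) :
    es.foldl (pvStep (p :: ps)) none = some (0, e₀) := by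
  induction es with
  | nil => simp at h
  | cons a es ih =>
    rw [List.find?_cons] at h
    simp only [List.foldl_cons]
    rw [pvFoldl_acc, pvStep_none, pvMP_cons]
    by_cases hp : PySem.Str.startswith a p
    · simp only [hp, if_true] at h ⊢
      simp only [Option.some.injEq] at h
      subst h
      cases es.foldl (pvStep (p :: ps)) none with
      | none => rfl
      | some b => simp [pvCombine]
    · simp only [hp, Bool.false_eq_true, if_false] at h ⊢ -- keep
      rw [ih h]
      cases hm : pvMatchPriorityIn ps a with
      | none => rfl
      | some i => simp [pvCombine]

theorem pvFoldl_cons_none (p : String) (ps es : List String)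
    (h : es.find? (fun e => PySem.Str.startswith e p) = none) :
    es.foldl (pvStep (p :: ps)) none
      = (es.foldl (pvStep ps) none).map (fun x => (x.1 + 1, x.2)) := by
  induction es with
  | nil => rfl
  | cons a es ih =>
    rw [List.find?_cons] at h
    by_cases hp : PySem.Str.startswith a p
    · simp only [PySem.Str.startswith_eq] at hp
      simp [hp] at h
    · simp only [hp, if_false, Bool.false_eq_true] at h
      simp only [List.foldl_cons]
      rw [pvFoldl_acc, pvFoldl_acc ps, ih h, pvStep_none, pvStep_none, pvMP_cons]
      simp only [hp, if_false, Bool.false_eq_true]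
      cases hm : pvMatchPriorityIn ps a <;>
        cases hf : es.foldl (pvStep ps) none <;>
        simp [pvCombine] <;> split_ifs <;> simp

theorem pvMain (ps es : List String) :
    ps.findSome? (fun p => es.find? (fun e => PySem.Str.startswith e p))
      = (es.foldl (pvStep ps) none).map (·.2) := by
  induction ps with
  | nil => simp [pvFoldl_nil_ps]
  | cons p ps ih =>
    rw [List.findSome?_cons]
    cases h : es.find? (fun e => PySem.Str.startswith e p) with
    | some e₀ => rw [pvFoldl_cons_some p ps es e₀ h]; rfl
    | none => rw [pvFoldl_cons_none p ps es h, ih]; simp [Option.map_map]; rfl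

theorem pvSuffixFind (es : List String) (domain : String) :
    es.find? (fun e => decide (domain ≠ "") && PySem.Str.endswith e ("@" ++ domain))
      = (if domain ≠ "" then es.find? (fun e => PySem.Str.endswith e ("@" ++ domain)) else none) := by
  split_ifs with h
  · congr 1; funext e; simp [h]
  · simp only [ne_eq, not_not] at h
    simp [h, List.find?_eq_none]

-- ===== VERDICT (by name: the statement is the Claim_ definition above) =====
theorem prefer_email_py_spec : Claim_equal_prefer_email_py := by
  intro emails domain _
  unfold Spec_prefer_email_py prefer_email_py prefer_email_py_alt
  by_cases he : emails.isEmpty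
  · simp [he]
  · simp only [he, Bool.false_eq_true, if_false]
    rw [pvMain pvPrefixes emails, pvSuffixFind]
    cases emails.foldl (pvStep pvPrefixes) none with
    | none => rfl
    | some b => rfl
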